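/- GENERATED by farm/mkstatement.py from design/units.tsv (unit `lookup1_values`) and the Specs of Vorbis/Spec/*.lean — do not edit.
   THE STATEMENT of the proof unit `lookup1_values`: the function `lookup1_values` (70 instructions) satisfies its contract,
   given the contracts of its callees. What the names mean: Vorbis/Spec/Basic.lean. The theorem to prove:
   `theorem lookup1_values_ok : Vorbis.Spec.lookup1_values.Statement`. -/
import Vorbis.Spec.Codebook
import Vorbis.Spec.Libm
namespace Vorbis.Spec.lookup1_values
open X86 X86.User Asan

/-- The statement of unit `lookup1_values`. -/
def Statement : Prop :=
  ∀ (Lay : Layout) (_hLay : Lay.hi = 0x1000000) (μ : Microarch) (_hμ : UserX.MicroOK μ) (u₀ : State)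
    (_hcode : HasCodeNat Lay u₀ Vorbis.L.lookup1_values.entry Vorbis.Code.code_lookup1_values.nat Vorbis.L.lookup1_values.size)
    (_h_log : ∀ (others : List Obj) (frames : List (Nat × FrameLayout)), Calls Lay μ Vorbis.WayInv (Vorbis.conv u₀) Vorbis.L.log.entry (Vorbis.Spec.log.spec others frames))
    (_h_exp : ∀ (others : List Obj) (frames : List (Nat × FrameLayout)), Calls Lay μ Vorbis.WayInv (Vorbis.conv u₀) Vorbis.L.exp.entry (Vorbis.Spec.exp.spec others frames))
    (_h_floor : ∀ (others : List Obj) (frames : List (Nat × FrameLayout)), Calls Lay μ Vorbis.WayInv (Vorbis.conv u₀) Vorbis.L.floor.entry (Vorbis.Spec.floor.spec others frames))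
    (_h_pow : ∀ (others : List Obj) (frames : List (Nat × FrameLayout)), Calls Lay μ Vorbis.WayInv (Vorbis.conv u₀) Vorbis.L.pow.entry (Vorbis.Spec.pow.spec others frames)),
    ∀ (others : List Obj) (frames : List (Nat × FrameLayout)), Calls Lay μ Vorbis.WayInv (Vorbis.conv u₀) Vorbis.L.lookup1_values.entry (Vorbis.Spec.lookup1_values.spec others frames)

end Vorbis.Spec.lookup1_values
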